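-- pv_equiv track=rewrite | github.com/ewdhp/molecular_physics | electronic_configurations.py | get_valence_subshell
-- ===== SOURCE A (Python) =====
-- ORBITAL_ORDER = [
--     '1s', '2s', '2p', '3s', '3p', '4s', '3d', '4p', '5s', '4d', '5p', '6s',
--     '4f', '5d', '6p', '7s', '5f', '6d', '7p'
-- ]
--
-- MAX_ELECTRONS = {
--     's': 2, 'p': 6, 'd': 10, 'f': 14
-- }
--
-- def get_orbital_type(orbital_str):
--     """Extract orbital type (s, p, d, f) from orbital string like '3d'."""
--     return orbital_str[-1]
--
-- def get_valence_subshell(config):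
--     """
--     Identify the outermost partially filled subshell.
--
--     Returns:
--     --------
--     tuple : (orbital_name, n_electrons, max_electrons)
--     """
--     # Find last orbital with electrons
--     last_orbital = None
--     for orbital in reversed(ORBITAL_ORDER):
--         if orbital in config and config[orbital] > 0:
--             orbital_type = get_orbital_type(orbital)
--             max_e = MAX_ELECTRONS[orbital_type]
--
--             # Return first partially filled or last filled
--             if config[orbital] < max_e or last_orbital is None:
--                 return (orbital, config[orbital], max_e)
--             last_orbital = orbital
--
--     return (last_orbital, config[last_orbital], MAX_ELECTRONS[get_orbital_type(last_orbital)])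
-- ===== SOURCE B (Python) =====
-- ORBITAL_ORDER = [
--     '1s', '2s', '2p', '3s', '3p', '4s', '3d', '4p', '5s', '4d', '5p', '6s',
--     '4f', '5d', '6p', '7s', '5f', '6d', '7p'
-- ]
--
-- MAX_ELECTRONS = {
--     's': 2, 'p': 6, 'd': 10, 'f': 14
-- }
--
-- def get_valence_subshell(config):
--     """Outermost occupied subshell: forward scan keeping the last (highest) hit."""
--     result = None
--     for orbital in ORBITAL_ORDER:
--         if orbital in config and config[orbital] > 0:
--             result = orbital
--     return (result, config[result], MAX_ELECTRONS[result[-1]])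
-- ===== Notes on version B (the rewrite author's own statement) =====
-- stated objective: simpler
-- what changed: Forward scan of ORBITAL_ORDER with an overwrite accumulator (no early return, no reversed iteration), dropping A's dead last_orbital/partially-filled branch whose condition is always true on the first hit; one final lookup builds the tuple.
import Mathlib
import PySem

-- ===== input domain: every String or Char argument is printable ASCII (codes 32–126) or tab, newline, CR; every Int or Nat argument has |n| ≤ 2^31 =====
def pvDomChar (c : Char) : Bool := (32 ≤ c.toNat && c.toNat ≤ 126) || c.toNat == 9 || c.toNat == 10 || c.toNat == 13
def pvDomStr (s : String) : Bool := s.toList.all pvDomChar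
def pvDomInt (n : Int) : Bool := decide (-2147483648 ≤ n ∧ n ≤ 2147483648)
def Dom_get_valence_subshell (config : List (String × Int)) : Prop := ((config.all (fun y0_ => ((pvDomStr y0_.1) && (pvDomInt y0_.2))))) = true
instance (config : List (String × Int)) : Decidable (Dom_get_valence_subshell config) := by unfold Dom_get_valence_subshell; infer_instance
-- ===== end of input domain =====

-- B replaces A's reversed early-return loop (with its dead `last_orbital` state) by a forward
-- scan keeping the last qualifying orbital in an accumulator; objective: simpler.
-- Equivalence is about the RETURN value; neither version mutates its argument.

-- Shared module constants (the Python module's ORBITAL_ORDER / MAX_ELECTRONS) and the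
-- dict primitives both Pythons use: first-match association-list lookup = Python dict lookup.
def ORBITAL_ORDER : List String :=
  ["1s", "2s", "2p", "3s", "3p", "4s", "3d", "4p", "5s", "4d", "5p", "6s",
   "4f", "5d", "6p", "7s", "5f", "6d", "7p"]

-- Python's MAX_ELECTRONS is keyed by one-character strings and only ever looked up at
-- get_orbital_type(o) = o[-1], a single character: keyed by Char here, exact on that use.
def MAX_ELECTRONS : PySem.Dict Char Int :=
  PySem.Dict.ofList [('s', 2), ('p', 6), ('d', 10), ('f', 14)]

-- orbital_str[-1]; the getD is unreachable on ORBITAL_ORDER's nonempty entries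
def get_orbital_type (s : String) : Char := (PySem.Str.pyGet? s (-1)).getD ' '

-- config[k] as Option: Python dict lookup on the association list (first match)
def cfgGet? (config : List (String × Int)) (k : String) : Option Int :=
  (config.find? (fun p => p.1 == k)).map (·.2)

-- ===== PORT A =====
-- A's loop over reversed(ORBITAL_ORDER), state last_orbital; early return = base cases.
-- Fall-through with last = none is Python's KeyError(None) (excluded by Pre_): dummy ("",0,0).
def aLoop (config : List (String × Int)) : List String → Option String → String × Int × Int
  | [], last =>
      match last with
      | some o => (o, (cfgGet? config o).getD 0,
                   (PySem.Dict.get? MAX_ELECTRONS (get_orbital_type o)).getD 0)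
      | none => ("", 0, 0)
  | o :: rest, last =>
      match cfgGet? config o with
      | some v =>
          if v > 0 then
            let maxE := (PySem.Dict.get? MAX_ELECTRONS (get_orbital_type o)).getD 0
            if v < maxE ∨ last = none then (o, v, maxE)
            else aLoop config rest (some o)
          else aLoop config rest last
      | none => aLoop config rest last

def get_valence_subshell (config : List (String × Int)) : String × Int × Int :=
  aLoop config ORBITAL_ORDER.reverse none

-- ===== PORT B =====
-- forward fold keeping the last orbital present with a positive count; final lookup builds
-- the tuple; result = none is Python's KeyError(None) (excluded by Pre_): dummy ("",0,0).
def get_valence_subshell_alt (config : List (String × Int)) : String × Int × Int :=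
  let result := ORBITAL_ORDER.foldl
    (fun acc o =>
      match cfgGet? config o with
      | some v => if v > 0 then some o else acc
      | none => acc) none
  match result with
  | some o => (o, (cfgGet? config o).getD 0,
               (PySem.Dict.get? MAX_ELECTRONS (get_orbital_type o)).getD 0)
  | none => ("", 0, 0)

-- ===== PRECONDITION & SPEC =====
-- Pre_ excludes exactly the configs with no positively-occupied orbital, where BOTH Pythons
-- raise KeyError(None).
def Pre_get_valence_subshell (config : List (String × Int)) : Prop :=
  ∃ o ∈ ORBITAL_ORDER, 0 < (cfgGet? config o).getD 0

instance (config : List (String × Int)) : Decidable (Pre_get_valence_subshell config) := by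
  unfold Pre_get_valence_subshell; infer_instance

def pvWitness_get_valence_subshell : (List (String × Int)) := [("1s", 2), ("2s", 1)]

def Spec_get_valence_subshell (config : List (String × Int)) (out : String × Int × Int) : Prop := out = get_valence_subshell_alt config
instance (config : List (String × Int)) (out : String × Int × Int) : Decidable (Spec_get_valence_subshell config out) := by unfold Spec_get_valence_subshell; infer_instance

-- ===== CLAIM (what is proved, stated in full; the proofs are below) =====
def Claim_equal_get_valence_subshell : Prop := ∀ (config : List (String × Int)), Dom_get_valence_subshell config → Pre_get_valence_subshell config → Spec_get_valence_subshell config (get_valence_subshell config)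

-- ===== LEMMAS AND PROOFS =====

-- the common "in config and > 0" test, and the common result tuple
def hitB (config : List (String × Int)) (o : String) : Bool :=
  match cfgGet? config o with
  | some v => decide (v > 0)
  | none => false

def retOf (config : List (String × Int)) (o : String) : String × Int × Int :=
  (o, (cfgGet? config o).getD 0, (PySem.Dict.get? MAX_ELECTRONS (get_orbital_type o)).getD 0)

-- A's loop started with last = none returns the FIRST hit of its list (the dead
-- `last_orbital` branch never fires: the condition holds at the first hit).
theorem aLoop_none_eq_find (config : List (String × Int)) (l : List String) :
    aLoop config l none =
      match l.find? (hitB config) with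
      | some o => retOf config o
      | none => ("", 0, 0) := by
  induction l with
  | nil => rfl
  | cons o rest ih =>
      simp only [aLoop, List.find?_cons, hitB]
      cases h : cfgGet? config o with
      | none => simpa [h] using ih
      | some v =>
          by_cases hv : v > 0
          · simp [hv, retOf, h]
          · simpa [hv] using ih

-- B's fold returns the LAST hit, i.e. the first hit of the reversed list.
theorem foldB_eq_find (config : List (String × Int)) (l : List String) (acc : Option String) :
    l.foldl
      (fun acc o =>
        match cfgGet? config o with
        | some v => if v > 0 then some o else acc
        | none => acc) acc =
    (l.reverse.find? (hitB config)).or acc := by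
  induction l generalizing acc with
  | nil => rfl
  | cons o rest ih =>
      simp only [List.foldl_cons, ih, List.reverse_cons, List.find?_append]
      cases h : cfgGet? config o with
      | none => simp [hitB, h]
      | some v =>
          by_cases hv : v > 0
          · simp [hitB, h, hv]
          · simp [hitB, h, hv]

-- ===== VERDICT (by name: the statement is the Claim_ definition above) =====
theorem get_valence_subshell_spec : Claim_equal_get_valence_subshell := by
  intro config _hdom _hpre
  unfold Spec_get_valence_subshell get_valence_subshell get_valence_subshell_alt
  rw [aLoop_none_eq_find, foldB_eq_find]
  cases h : ORBITAL_ORDER.reverse.find? (hitB config) with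
  | none => simp
  | some o => simp [retOf]
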